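-- pv_equiv track=rewrite | github.com/dfielding14/SFunctor | sfunctor/io/extract.py | Morton_array_to_int
-- ===== SOURCE A (Python) =====
-- def Morton_array_to_int(arr):
--     """
--     Convert a three-element array [a, b, c] into an integer (0 <= n < 2^18)
--     by interleaving the bits of the 6-bit numbers a, b, and c.
--
--     The array [a, b, c] represents a point in a 64x64x64 grid.
--     The integer n is constructed as an 18-bit number:
--        n = b17 b16 ... b0
--
--     The bits are interleaved so that:
--       - Bits from 'a' go to positions 3*i + 0,
--       - Bits from 'b' go to positions 3*i + 1,
--       - Bits from 'c' go to positions 3*i + 2,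
--     for i = 0 to 5 (with bit i being the i-th least significant bit of a, b, or c).
--     """
--     if len(arr) != 3:
--         raise ValueError("Input array must have exactly three elements [a, b, c].")
--
--     a, b, c = arr
--     # Check that a, b, and c are in the valid range for 6-bit numbers.
--     for coord in (a, b, c):
--         if coord < 0 or coord >= 64:
--             raise ValueError("Each coordinate must be in the range 0 to 63 (inclusive).")
--
--     n = 0
--     # Each coordinate is a 6-bit number, so we iterate over 6 bits.
--     for i in range(6):
--         # Extract the i-th bit from each coordinate and put it in the proper position:
--         n |= ((a >> i) & 1) << (3 * i + 0)
--         n |= ((b >> i) & 1) << (3 * i + 1)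
--         n |= ((c >> i) & 1) << (3 * i + 2)
--     return n
-- ===== SOURCE B (Python) =====
-- def Morton_array_to_int(arr):
--     if len(arr) != 3:
--         raise ValueError("Input array must have exactly three elements [a, b, c].")
--     a, b, c = arr
--     for coord in (a, b, c):
--         if coord < 0 or coord >= 64:
--             raise ValueError("Each coordinate must be in the range 0 to 63 (inclusive).")
--
--     def spread(x):
--         # spread the 6 bits of x to bit positions 0,3,6,9,12,15
--         x = (x | (x << 8)) & 0x300F
--         x = (x | (x << 4)) & 0x30C3
--         x = (x | (x << 2)) & 0x9249
--         return x
--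
--     return spread(a) | (spread(b) << 1) | (spread(c) << 2)
-- ===== Notes on version B (the rewrite author's own statement) =====
-- stated objective: idiomatic
-- what changed: Replaced the 6-iteration bit-by-bit interleaving loop with the standard branch-free Morton encode: a bit-parallel spread helper (three x=(x|x<<k)&mask steps) applied to each coordinate, combined as spread(a) | spread(b)<<1 | spread(c)<<2.
import Mathlib
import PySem

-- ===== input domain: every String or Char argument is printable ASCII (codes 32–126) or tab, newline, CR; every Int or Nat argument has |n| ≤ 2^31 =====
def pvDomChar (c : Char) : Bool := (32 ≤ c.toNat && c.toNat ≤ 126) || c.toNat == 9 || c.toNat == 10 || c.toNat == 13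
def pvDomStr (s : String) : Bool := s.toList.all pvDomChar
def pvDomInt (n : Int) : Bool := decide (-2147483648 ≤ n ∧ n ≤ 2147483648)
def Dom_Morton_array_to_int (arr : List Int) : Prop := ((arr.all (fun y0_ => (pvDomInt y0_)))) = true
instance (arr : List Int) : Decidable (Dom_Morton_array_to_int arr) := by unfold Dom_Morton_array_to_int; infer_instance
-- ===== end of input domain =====

-- B replaces A's 6-iteration bit-by-bit interleaving loop with the standard branch-free
-- bit-parallel Morton spread (objective: idiomatic); same ValueError conditions, excluded by Pre_.

-- ===== PORT A =====
-- the `for i in range(6)` loop; shift counts are (3*i+j).toNat, exact since i ∈ 0..5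
def pyInterleave (a b c : Int) : Int :=
  (PySem.List.pyRange 0 6 1).foldl (fun n i =>
    let n := PySem.Int.bor n ((PySem.Int.band (a >>> i.toNat) 1) <<< (3 * i + 0).toNat)
    let n := PySem.Int.bor n ((PySem.Int.band (b >>> i.toNat) 1) <<< (3 * i + 1).toNat)
    PySem.Int.bor n ((PySem.Int.band (c >>> i.toNat) 1) <<< (3 * i + 2).toNat)) 0

def Morton_array_to_int (arr : List Int) : Int :=
  match arr with
  | [a, b, c] =>
    if a < 0 ∨ 64 ≤ a ∨ b < 0 ∨ 64 ≤ b ∨ c < 0 ∨ 64 ≤ c then 0  -- Python: ValueError (outside Pre_)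
    else pyInterleave a b c
  | _ => 0  -- Python: ValueError on len(arr) != 3 (outside Pre_)

-- ===== PORT B =====
-- spread the 6 bits of x to bit positions 0,3,6,9,12,15
def pySpread (x : Int) : Int :=
  let x := PySem.Int.band (PySem.Int.bor x (x <<< (8 : Nat))) 0x300F
  let x := PySem.Int.band (PySem.Int.bor x (x <<< (4 : Nat))) 0x30C3
  PySem.Int.band (PySem.Int.bor x (x <<< (2 : Nat))) 0x9249

def Morton_array_to_int_alt (arr : List Int) : Int :=
  if arr.length = 3 then
    let a := PySem.List.pyGetD arr 0 0
    let b := PySem.List.pyGetD arr 1 0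
    let c := PySem.List.pyGetD arr 2 0
    if a < 0 ∨ 64 ≤ a ∨ b < 0 ∨ 64 ≤ b ∨ c < 0 ∨ 64 ≤ c then 0  -- Python: ValueError (outside Pre_)
    else PySem.Int.bor (PySem.Int.bor (pySpread a) (pySpread b <<< (1 : Nat))) (pySpread c <<< (2 : Nat))
  else 0  -- Python: ValueError on len(arr) != 3 (outside Pre_)

-- ===== PRECONDITION & SPEC =====
-- Pre_ excludes exactly the inputs where Python A raises ValueError: wrong length or a coordinate outside 0..63.
def Pre_Morton_array_to_int (arr : List Int) : Prop :=
  arr.length = 3 ∧ ∀ x ∈ arr, 0 ≤ x ∧ x < 64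

instance (arr : List Int) : Decidable (Pre_Morton_array_to_int arr) := by
  unfold Pre_Morton_array_to_int; infer_instance

def pvWitness_Morton_array_to_int : List Int := [5, 17, 63]

def Spec_Morton_array_to_int (arr : List Int) (out : Int) : Prop := out = Morton_array_to_int_alt arr
instance (arr : List Int) (out : Int) : Decidable (Spec_Morton_array_to_int arr out) := by
  unfold Spec_Morton_array_to_int; infer_instance

-- ===== CLAIM (what is proved, stated in full; the proofs are below) =====
def Claim_equal_Morton_array_to_int : Prop :=
  ∀ (arr : List Int), Dom_Morton_array_to_int arr → Pre_Morton_array_to_int arr →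
    Spec_Morton_array_to_int arr (Morton_array_to_int arr)

-- ===== LEMMAS AND PROOFS =====

-- Nat mirrors of the two computations (proof-side only)
def natInterleave (a b c : Nat) : Nat :=
  ([0, 1, 2, 3, 4, 5] : List Nat).foldl (fun n i =>
    let n := n ||| (((a >>> i) &&& 1) <<< (3 * i + 0))
    let n := n ||| (((b >>> i) &&& 1) <<< (3 * i + 1))
    n ||| (((c >>> i) &&& 1) <<< (3 * i + 2))) 0

def natSpread (x : Nat) : Nat :=
  let x := (x ||| (x <<< 8)) &&& 0x300F
  let x := (x ||| (x <<< 4)) &&& 0x30C3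
  (x ||| (x <<< 2)) &&& 0x9249

-- the 6 terms a single coordinate contributes, at bit offsets 0 / 1 / 2
def groupA (x : Nat) : Nat :=
  (((((((x >>> 0) &&& 1) <<< 0 ||| ((x >>> 1) &&& 1) <<< 3) ||| ((x >>> 2) &&& 1) <<< 6) |||
      ((x >>> 3) &&& 1) <<< 9) ||| ((x >>> 4) &&& 1) <<< 12) ||| ((x >>> 5) &&& 1) <<< 15)

def groupB (x : Nat) : Nat :=
  (((((((x >>> 0) &&& 1) <<< 1 ||| ((x >>> 1) &&& 1) <<< 4) ||| ((x >>> 2) &&& 1) <<< 7) |||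
      ((x >>> 3) &&& 1) <<< 10) ||| ((x >>> 4) &&& 1) <<< 13) ||| ((x >>> 5) &&& 1) <<< 16)

def groupC (x : Nat) : Nat :=
  (((((((x >>> 0) &&& 1) <<< 2 ||| ((x >>> 1) &&& 1) <<< 5) ||| ((x >>> 2) &&& 1) <<< 8) |||
      ((x >>> 3) &&& 1) <<< 11) ||| ((x >>> 4) &&& 1) <<< 14) ||| ((x >>> 5) &&& 1) <<< 17)

set_option maxHeartbeats 1000000 in
theorem interleave_regroup (a b c : Nat) :
    natInterleave a b c = (groupA a ||| groupB b) ||| groupC c := by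
  simp only [natInterleave, groupA, groupB, groupC, List.foldl, Nat.zero_or]
  ac_rfl

theorem groupA_eq_spread : ∀ x : Nat, x < 64 → groupA x = natSpread x := by decide
theorem groupB_eq_spread : ∀ x : Nat, x < 64 → groupB x = natSpread x <<< 1 := by decide
theorem groupC_eq_spread : ∀ x : Nat, x < 64 → groupC x = natSpread x <<< 2 := by decide

theorem natKey (a b c : Nat) (ha : a < 64) (hb : b < 64) (hc : c < 64) :
    natInterleave a b c = (natSpread a ||| natSpread b <<< 1) ||| natSpread c <<< 2 := by
  rw [interleave_regroup, groupA_eq_spread a ha, groupB_eq_spread b hb, groupC_eq_spread c hc]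

-- cast lemmas pushing Nat casts outward through the PySem Int bit operations
theorem castShlN (n j : Nat) : ((n : Int) <<< j) = ((n <<< j : Nat) : Int) := rfl
theorem castBor (n m : Nat) : PySem.Int.bor (n : Int) (m : Int) = ((n ||| m : Nat) : Int) := rfl
theorem castBand1 (n : Nat) : PySem.Int.band (n : Int) 1 = ((n &&& 1 : Nat) : Int) := rfl
theorem castBandM1 (n : Nat) : PySem.Int.band (n : Int) 12303 = ((n &&& 12303 : Nat) : Int) := rfl
theorem castBandM2 (n : Nat) : PySem.Int.band (n : Int) 12483 = ((n &&& 12483 : Nat) : Int) := rfl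
theorem castBandM3 (n : Nat) : PySem.Int.band (n : Int) 37449 = ((n &&& 37449 : Nat) : Int) := rfl
theorem cnt0' (i : Nat) : (3 * (i : Int) + ((0 : Nat) : Int)).toNat = 3 * i + 0 := by omega
theorem cnt1 (i : Nat) : (3 * (i : Int) + 1).toNat = 3 * i + 1 := by omega
theorem cnt2 (i : Nat) : (3 * (i : Int) + 2).toNat = 3 * i + 2 := by omega

theorem interleave_cast (n m k : Nat) :
    pyInterleave (n : Int) (m : Int) (k : Int) = ((natInterleave n m k : Nat) : Int) := by
  have h6 : PySem.List.pyRange 0 6 1 = List.map (Nat.cast) ([0, 1, 2, 3, 4, 5] : List Nat) := by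
    decide
  simp only [pyInterleave, natInterleave, h6, List.foldl_map]
  have h0 : (0 : Int) = ((0 : Nat) : Int) := rfl
  conv_lhs => rw [h0]
  refine List.foldl_hom (f := (Nat.cast : Nat → Int)) (fun acc i => ?_)
  simp only [Int.toNat_natCast, cnt0', cnt1, cnt2, Int.shiftRight_natCast, Int.shiftLeft_natCast,
    castBand1, castBor]

theorem spread_cast (x : Nat) : pySpread (x : Int) = ((natSpread x : Nat) : Int) := by
  simp only [pySpread, natSpread, castShlN, castBor, castBandM1, castBandM2, castBandM3]

theorem intKey (n m k : Nat) (hn : n < 64) (hm : m < 64) (hk : k < 64) :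
    pyInterleave (n : Int) (m : Int) (k : Int) =
      PySem.Int.bor (PySem.Int.bor (pySpread (n : Int)) (pySpread (m : Int) <<< (1 : Nat)))
        (pySpread (k : Int) <<< (2 : Nat)) := by
  rw [interleave_cast, spread_cast, spread_cast, spread_cast, castShlN, castShlN,
    castBor, castBor, natKey n m k hn hm hk]

-- ===== VERDICT (by name: the statement is the Claim_ definition above) =====
theorem Morton_array_to_int_spec : Claim_equal_Morton_array_to_int := by
  intro arr _hdom hpre
  obtain ⟨hlen, hall⟩ := hpre
  match arr with
  | [a, b, c] =>
    have ha := hall a (by simp)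
    have hb := hall b (by simp)
    have hc := hall c (by simp)
    unfold Spec_Morton_array_to_int
    show Morton_array_to_int [a, b, c] = Morton_array_to_int_alt [a, b, c]
    have hA : Morton_array_to_int [a, b, c] = pyInterleave a b c := by
      simp only [Morton_array_to_int]
      rw [if_neg (by omega)]
    have hB : Morton_array_to_int_alt [a, b, c] =
        PySem.Int.bor (PySem.Int.bor (pySpread a) (pySpread b <<< (1 : Nat)))
          (pySpread c <<< (2 : Nat)) := by
      show (if a < 0 ∨ 64 ≤ a ∨ b < 0 ∨ 64 ≤ b ∨ c < 0 ∨ 64 ≤ c then (0 : Int)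
        else PySem.Int.bor (PySem.Int.bor (pySpread a) (pySpread b <<< (1 : Nat)))
          (pySpread c <<< (2 : Nat))) = _
      rw [if_neg (by omega)]
    rw [hA, hB]
    have h1 : a = ((a.toNat : Nat) : Int) := (Int.toNat_of_nonneg ha.1).symm
    have h2 : b = ((b.toNat : Nat) : Int) := (Int.toNat_of_nonneg hb.1).symm
    have h3 : c = ((c.toNat : Nat) : Int) := (Int.toNat_of_nonneg hc.1).symm
    rw [h1, h2, h3]
    exact intKey a.toNat b.toNat c.toNat (by omega) (by omega) (by omega)
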